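-- pv_equiv track=rewrite | github.com/apratim-1407/mf-faq-assistant | app.py | is_advice_question
-- ===== SOURCE A (Python) =====
-- def is_advice_question(text: str) -> bool:
--     lower = text.lower()
--     phrases = [
--         "should i invest", "should i buy", "should i sell",
--         "which fund is better", "which is better", "best fund",
--         "top fund", "recommend a fund", "recommendation",
--         "suggest a fund", "what should i invest in",
--         "where should i invest", "buy or sell",
--         "expected return", "future return", "forecast",
--         "projected return", "good investment", "bad investment",
--         "compare this fund", "comparison", " vs ", " versus ",
--     ]
--     return any(p in lower for p in phrases)
-- ===== SOURCE B (Python) =====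
-- def is_advice_question(text: str) -> bool:
--     phrases = [
--         "should i invest", "should i buy", "should i sell",
--         "which fund is better", "which is better", "best fund",
--         "top fund", "recommend a fund", "recommendation",
--         "suggest a fund", "what should i invest in",
--         "where should i invest", "buy or sell",
--         "expected return", "future return", "forecast",
--         "projected return", "good investment", "bad investment",
--         "compare this fund", "comparison", " vs ", " versus ",
--     ]
--     s = text.lower()
--     for i in range(len(s) + 1):
--         for p in phrases:
--             if s.startswith(p, i):
--                 return True
--     return False
-- ===== Notes on version B (the rewrite author's own statement) =====
-- stated objective: alternative
-- what changed: A asks for each phrase whether it occurs anywhere (24 independent substring scans); B makes one left-to-right pass over the text, testing at each position whether any phrase starts there with startswith.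
import Mathlib
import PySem

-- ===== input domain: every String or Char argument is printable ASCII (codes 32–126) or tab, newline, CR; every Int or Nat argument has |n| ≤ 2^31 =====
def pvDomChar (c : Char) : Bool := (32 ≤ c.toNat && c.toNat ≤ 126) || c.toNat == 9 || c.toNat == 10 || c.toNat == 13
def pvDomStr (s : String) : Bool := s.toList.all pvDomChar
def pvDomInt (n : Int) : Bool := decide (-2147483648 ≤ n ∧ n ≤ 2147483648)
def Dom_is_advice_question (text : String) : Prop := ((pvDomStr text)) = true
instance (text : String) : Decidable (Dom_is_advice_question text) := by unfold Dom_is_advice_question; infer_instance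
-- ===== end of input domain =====

-- B replaces A's 24 independent whole-string substring tests by one left-to-right
-- positional scan that tests, at each index, whether any phrase starts there (alternative, same cost).


-- ===== PORT A =====
def pvPhrasesA : List String := [
    "should i invest", "should i buy", "should i sell",
    "which fund is better", "which is better", "best fund",
    "top fund", "recommend a fund", "recommendation",
    "suggest a fund", "what should i invest in",
    "where should i invest", "buy or sell",
    "expected return", "future return", "forecast",
    "projected return", "good investment", "bad investment",
    "compare this fund", "comparison", " vs ", " versus "]

def is_advice_question (text : String) : Bool :=
  let lower := PySem.Str.lower text
  pvPhrasesA.any (fun p => PySem.Str.isIn p lower)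

-- ===== PORT B =====
def pvPhrasesB : List String := [
    "should i invest", "should i buy", "should i sell",
    "which fund is better", "which is better", "best fund",
    "top fund", "recommend a fund", "recommendation",
    "suggest a fund", "what should i invest in",
    "where should i invest", "buy or sell",
    "expected return", "future return", "forecast",
    "projected return", "good investment", "bad investment",
    "compare this fund", "comparison", " vs ", " versus "]

-- the 'for i in range(len(s)+1)' loop: each step looks at the suffix s[i:] (one extra
-- recursion step for the empty suffix, matching i = len(s)); 's.startswith(p, i)' is
-- PySem.Chars.startswith on that suffix (exact for 0 ≤ i ≤ len(s)).
def pvScan (phrases : List (List Char)) : List Char → Bool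
  | [] => phrases.any (fun p => PySem.Chars.startswith [] p)
  | c :: rest =>
      phrases.any (fun p => PySem.Chars.startswith (c :: rest) p) || pvScan phrases rest

def is_advice_question_alt (text : String) : Bool :=
  pvScan (pvPhrasesB.map String.toList) (PySem.Chars.lower text.toList)

-- ===== PRECONDITION & SPEC =====
def Spec_is_advice_question (text : String) (out : Bool) : Prop := out = is_advice_question_alt text
instance (text : String) (out : Bool) : Decidable (Spec_is_advice_question text out) := by unfold Spec_is_advice_question; infer_instance

-- ===== CLAIM (what is proved, stated in full; the proofs are below) =====
def Claim_equal_is_advice_question : Prop := ∀ (text : String), Dom_is_advice_question text → Spec_is_advice_question text (is_advice_question text)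

-- ===== LEMMAS AND PROOFS =====

lemma pvScan_true_iff (ph : List (List Char)) (s : List Char) :
    pvScan ph s = true ↔ ∃ p ∈ ph, ∃ j : Nat, p <+: s.drop j := by
  induction s with
  | nil =>
      simp [pvScan, List.any_eq_true, PySem.Chars.startswith_iff]
  | cons c rest ih =>
      simp only [pvScan, Bool.or_eq_true, List.any_eq_true, PySem.Chars.startswith_iff, ih]
      constructor
      · rintro (⟨p, hp, hpre⟩ | ⟨p, hp, j, hpre⟩)
        · exact ⟨p, hp, 0, hpre⟩
        · exact ⟨p, hp, j + 1, hpre⟩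
      · rintro ⟨p, hp, j, hpre⟩
        cases j with
        | zero => exact Or.inl ⟨p, hp, hpre⟩
        | succ k => exact Or.inr ⟨p, hp, k, hpre⟩

lemma pvScan_eq_any_isIn (ph : List (List Char)) (s : List Char) :
    pvScan ph s = ph.any (fun p => PySem.Chars.isIn p s) := by
  rcases h : ph.any (fun p => PySem.Chars.isIn p s) with _ | _
  · rw [Bool.eq_false_iff]
    intro hs
    rcases (pvScan_true_iff ph s).1 hs with ⟨p, hp, hj⟩
    have : PySem.Chars.isIn p s = true := (PySem.Chars.exists_prefix_drop_iff_isIn p s).1 hj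
    simp only [List.any_eq_false] at h
    exact absurd this (by simpa using h p hp)
  · rcases List.any_eq_true.1 h with ⟨p, hp, hin⟩
    exact (pvScan_true_iff ph s).2 ⟨p, hp, (PySem.Chars.exists_prefix_drop_iff_isIn p s).2 (by simpa using hin)⟩

-- ===== VERDICT (by name: the statement is the Claim_ definition above) =====
theorem is_advice_question_spec : Claim_equal_is_advice_question := by
  intro text _
  show is_advice_question text = is_advice_question_alt text
  rw [is_advice_question, is_advice_question_alt, pvScan_eq_any_isIn, List.any_map]
  simp [PySem.Str.isIn_eq, Function.comp, pvPhrasesA, pvPhrasesB]
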